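-- pv_equiv track=rewrite | github.com/log6305/HIV_2024_TP1 | count_words.py | count
-- ===== SOURCE A (Python) =====
-- def count(s:str) -> int:
--     """
--     Args:
--       s (str): The parameter `s` is a string that represents a sentence or a sequence of words.
--     Returns:
--       The function returns the number of words in the input string `s` that end with either "s"
--     or "r".
--     """
--     words = 0
--     last = ' '
--
--     for char in s:
--         if not char.isalpha() and (last == 's' or last == 'r'):
--             words += 1
--         last = char
--
--     if last == 'r' or last == 's':
--         words += 1
--
--     return words
-- ===== SOURCE B (Python) =====
-- def count(s: str) -> int:
--     # Stage 1: segment s into its maximal alphabetic runs (the words).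
--     words = []
--     cur = ''
--     for ch in s:
--         if ch.isalpha():
--             cur += ch
--         else:
--             if cur:
--                 words.append(cur)
--             cur = ''
--     if cur:
--         words.append(cur)
--     # Stage 2: count the words whose final letter is 's' or 'r'.
--     return sum(w[-1] in 'sr' for w in words)
-- ===== Notes on version B (the rewrite author's own statement) =====
-- stated objective: alternative
-- what changed: B is a two-stage decomposition: it first materializes the list of maximal alphabetic runs (the words) and then, in a second pass, counts those whose last character is 's' or 'r', instead of A's single inline counter driven by the previous character and a post-loop fixup.
import Mathlib
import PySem

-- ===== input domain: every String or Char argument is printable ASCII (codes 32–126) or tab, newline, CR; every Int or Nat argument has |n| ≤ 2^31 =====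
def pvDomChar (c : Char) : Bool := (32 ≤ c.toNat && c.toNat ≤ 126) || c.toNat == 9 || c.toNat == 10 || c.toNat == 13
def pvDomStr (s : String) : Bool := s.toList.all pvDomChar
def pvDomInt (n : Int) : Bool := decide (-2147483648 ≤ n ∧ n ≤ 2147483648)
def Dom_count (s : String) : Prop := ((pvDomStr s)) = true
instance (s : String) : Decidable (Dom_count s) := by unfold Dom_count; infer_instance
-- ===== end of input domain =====

-- B first materializes the list of maximal alphabetic runs (the words) and then, in a
-- second pass, counts those whose last character is 's' or 'r' — instead of A's inline
-- counter driven by the previous character: objective = alternative decomposition.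

-- ===== PORT A =====
-- the for-loop over s with state (words, last), then the final check on last
def countLoop : List Char → Char → Int → Int
  | [], last, words => if last = 'r' || last = 's' then words + 1 else words
  | c :: rest, last, words =>
      countLoop rest c
        (if (!PySem.Chars.isalpha c) && (last = 's' || last = 'r') then words + 1 else words)

def count (s : String) : Int := countLoop s.toList ' ' 0

-- ===== PORT B =====
-- stage-1 loop body: extend the current run on a letter, otherwise flush it into words
def wordsStep (st : List (List Char) × List Char) (ch : Char) : List (List Char) × List Char :=
  if PySem.Chars.isalpha ch then (st.1, st.2 ++ [ch])
  else if st.2 ≠ [] then (st.1 ++ [st.2], []) else (st.1, [])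

-- w[-1] in 'sr'  (every collected word is nonempty, so getLast? is exact for w[-1])
def wordTally (w : List Char) : Int :=
  if w.getLast? = some 's' || w.getLast? = some 'r' then 1 else 0

def count_alt (s : String) : Int :=
  let st := s.toList.foldl wordsStep ([], [])
  let words := if st.2 ≠ [] then st.1 ++ [st.2] else st.1
  (words.map wordTally).sum

-- ===== PRECONDITION & SPEC =====
def Spec_count (s : String) (out : Int) : Prop := out = count_alt s
instance (s : String) (out : Int) : Decidable (Spec_count s out) := by unfold Spec_count; infer_instance

-- ===== CLAIM (what is proved, stated in full; the proofs are below) =====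
def Claim_equal_count : Prop := ∀ (s : String), Dom_count s → Spec_count s (count s)

-- ===== LEMMAS AND PROOFS =====

-- common reference: count of word-endings in cs, given whether the pending word ends in s/r
def E : List Char → Bool → Int
  | [], b => if b then 1 else 0
  | c :: cs, b =>
      if PySem.Chars.isalpha c then E cs (c = 's' || c = 'r')
      else (if b then 1 else 0) + E cs false

theorem notalpha_not_sr (c : Char) (h : PySem.Chars.isalpha c = false) :
    ((c = 's' || c = 'r') : Bool) = false := by
  by_cases hs : c = 's'
  · subst hs; exact absurd h (by decide)
  · by_cases hr : c = 'r'
    · subst hr; exact absurd h (by decide)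
    · simp [hs, hr]

theorem countLoop_eq_E (cs : List Char) :
    ∀ (last : Char) (words : Int),
      countLoop cs last words = words + E cs (last = 's' || last = 'r') := by
  induction cs with
  | nil =>
    intro last words
    simp only [countLoop, E]
    by_cases hs : last = 's' <;> by_cases hr : last = 'r' <;> simp [hs, hr]
  | cons c rest ih =>
    intro last words
    simp only [countLoop, E, ih]
    by_cases ha : PySem.Chars.isalpha c
    · simp [ha]
    · rw [notalpha_not_sr c (by simp [ha])]
      simp only [Bool.not_eq_true] at ha
      simp only [ha, Bool.not_false, Bool.true_and, if_neg (by simp : ¬False)]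
      split <;> simp <;> ring

def wSum (ws : List (List Char)) : Int := (ws.map wordTally).sum

def finalCount (st : List (List Char) × List Char) : Int :=
  wSum (if st.2 ≠ [] then st.1 ++ [st.2] else st.1)

theorem finalCount_eq (st : List (List Char) × List Char) :
    finalCount st = wSum st.1 + (if (st.2.getLast? = some 's' || st.2.getLast? = some 'r' : Bool) then 1 else 0) := by
  obtain ⟨ws, cur⟩ := st
  cases cur with
  | nil => simp [finalCount, wSum]
  | cons a l => simp [finalCount, wSum, wordTally]

theorem foldl_wordsStep_eq_E (cs : List Char) :
    ∀ (ws : List (List Char)) (cur : List Char),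
      finalCount (List.foldl wordsStep (ws, cur) cs)
        = wSum ws + E cs (cur.getLast? = some 's' || cur.getLast? = some 'r') := by
  induction cs with
  | nil => intro ws cur; simpa [E] using finalCount_eq (ws, cur)
  | cons c rest ih =>
    intro ws cur
    simp only [List.foldl_cons]
    by_cases ha : PySem.Chars.isalpha c
    · have hstep : wordsStep (ws, cur) c = (ws, cur ++ [c]) := by simp [wordsStep, ha]
      rw [hstep, ih]
      have hl : (cur ++ [c]).getLast? = some c := by simp
      simp [E, ha, hl]
    · have hsr := notalpha_not_sr c (by simp [ha])
      cases hcur : cur with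
      | nil =>
        subst hcur
        have hstep : wordsStep (ws, ([] : List Char)) c = (ws, []) := by simp [wordsStep, ha]
        rw [hstep, ih]
        simp [E, ha]
      | cons a l =>
        subst hcur
        have hstep : wordsStep (ws, a :: l) c = (ws ++ [a :: l], []) := by
          simp [wordsStep, ha]
        rw [hstep, ih]
        simp only [E, ha, if_neg (by simp [ha] : ¬ (PySem.Chars.isalpha c = true))]
        have : wSum (ws ++ [a :: l]) = wSum ws + wordTally (a :: l) := by simp [wSum]
        rw [this]
        simp only [wordTally, List.getLast?_eq_none_iff]
        split <;> simp <;> ring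

-- ===== VERDICT (by name: the statement is the Claim_ definition above) =====
theorem count_spec : Claim_equal_count := by
  intro s _
  unfold Spec_count count count_alt
  rw [countLoop_eq_E]
  have := foldl_wordsStep_eq_E s.toList [] []
  simp only [List.getLast?_nil] at this
  simp only [finalCount, wSum] at this
  rw [this]
  simp
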